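-- pv_equiv track=rewrite | github.com/strAngel-010/RPA | actions/__init__.py | gen_new_state
-- ===== SOURCE A (Python) =====
-- def gen_new_state(ind):
--     res = "to"
--     for i in range(0, len(ind), 1):
--         if (ind[i] == 1):
--             if (i == 0): res = res+"_service"
--             elif (i == 1): res = res+"_place"
--             elif (i == 2): res = res+"_card"
--             elif (i == 3): res = res+"_limit"
--             else: return None
--     if res == "to_service_place_card_limit": return "to_full"
--     return res
-- ===== SOURCE B (Python) =====
-- _STATES = [
--     "to", "to_service", "to_place", "to_service_place",
--     "to_card", "to_service_card", "to_place_card", "to_service_place_card",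
--     "to_limit", "to_service_limit", "to_place_limit", "to_service_place_limit",
--     "to_card_limit", "to_service_card_limit", "to_place_card_limit", "to_full",
-- ]
--
-- def gen_new_state(ind):
--     if any(x == 1 for x in ind[4:]):
--         return None
--     mask = sum(1 << i for i, x in enumerate(ind[:4]) if x == 1)
--     return _STATES[mask]
-- ===== Notes on version B (the rewrite author's own statement) =====
-- stated objective: alternative
-- what changed: B encodes the first four indicators as a 4-bit mask and returns the answer by indexing a precomputed 16-entry state table (after one tail-validation pass), instead of A's index loop concatenating suffix strings via an if/elif chain with the final to_full rewrite.
import Mathlib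
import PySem

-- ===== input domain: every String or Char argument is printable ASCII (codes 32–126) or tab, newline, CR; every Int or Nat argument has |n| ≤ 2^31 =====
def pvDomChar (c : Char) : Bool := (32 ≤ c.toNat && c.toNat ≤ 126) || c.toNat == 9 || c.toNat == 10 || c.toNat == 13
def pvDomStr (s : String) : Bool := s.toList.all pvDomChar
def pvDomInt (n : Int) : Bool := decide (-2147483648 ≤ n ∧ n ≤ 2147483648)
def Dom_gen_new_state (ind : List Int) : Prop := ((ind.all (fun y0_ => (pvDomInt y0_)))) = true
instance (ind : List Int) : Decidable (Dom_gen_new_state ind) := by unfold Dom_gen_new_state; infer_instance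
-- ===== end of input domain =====

-- B encodes the first four indicators as a 4-bit mask and answers by indexing a precomputed 16-entry state table (objective: alternative).


-- ===== PORT A =====
-- the for-loop of A: iterate over the elements with the running index i and accumulator res
def genA_loop : List Int → Nat → String → Option String
  | [], _, res => some res
  | x :: xs, i, res =>
    if x == 1 then
      if i == 0 then genA_loop xs (i+1) (res ++ "_service")
      else if i == 1 then genA_loop xs (i+1) (res ++ "_place")
      else if i == 2 then genA_loop xs (i+1) (res ++ "_card")
      else if i == 3 then genA_loop xs (i+1) (res ++ "_limit")
      else none
    else genA_loop xs (i+1) res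

def gen_new_state (ind : List Int) : Option String :=
  match genA_loop ind 0 "to" with
  | none => none
  | some res => if res == "to_service_place_card_limit" then some "to_full" else some res

-- ===== PORT B =====
-- the module-level _STATES table of Source B
def genStates : List String :=
  ["to", "to_service", "to_place", "to_service_place",
   "to_card", "to_service_card", "to_place_card", "to_service_place_card",
   "to_limit", "to_service_limit", "to_place_limit", "to_service_place_limit",
   "to_card_limit", "to_service_card_limit", "to_place_card_limit", "to_full"]

def gen_new_state_alt (ind : List Int) : Option String :=
  if (ind.drop 4).any (fun x => x == 1) then none
  else
    -- sum(1 << i for i, x in enumerate(ind[:4]) if x == 1)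
    let mask : Nat :=
      ((PySem.List.enumerate (ind.take 4)).filter (fun p => p.2 == 1)).foldl
        (fun a p => a + (1 <<< p.1.toNat)) 0
    some (genStates.getD mask "")

-- ===== PRECONDITION & SPEC =====
def Spec_gen_new_state (ind : List Int) (out : Option String) : Prop := out = gen_new_state_alt ind
instance (ind : List Int) (out : Option String) : Decidable (Spec_gen_new_state ind out) := by unfold Spec_gen_new_state; infer_instance

-- ===== CLAIM (what is proved, stated in full; the proofs are below) =====
def Claim_equal_gen_new_state : Prop := ∀ (ind : List Int), Dom_gen_new_state ind → Spec_gen_new_state ind (gen_new_state ind)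

-- ===== LEMMAS AND PROOFS =====

-- once the index has passed 3, A's loop is just a tail-validation scan
theorem genA_loop_tail (xs : List Int) (i : Nat) (res : String) (hi : 4 ≤ i) :
    genA_loop xs i res = if xs.any (fun x => x == 1) then none else some res := by
  induction xs generalizing i with
  | nil => simp [genA_loop]
  | cons x t ih =>
    by_cases hx : x = 1
    · have h0 : i ≠ 0 := by omega
      have h1 : i ≠ 1 := by omega
      have h2 : i ≠ 2 := by omega
      have h3 : i ≠ 3 := by omega
      simp [genA_loop, hx, h0, h1, h2, h3]
    · simp [genA_loop, hx, ih (i+1) (by omega)]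

-- ===== VERDICT (by name: the statement is the Claim_ definition above) =====
theorem gen_new_state_spec : Claim_equal_gen_new_state := by
  intro ind _
  show gen_new_state ind = gen_new_state_alt ind
  match ind with
  | [] => decide
  | [a] =>
    by_cases ha : a = 1 <;>
      simp [gen_new_state, gen_new_state_alt, genA_loop, genStates, ha,
        PySem.List.enumerate]
  | [a, b] =>
    by_cases ha : a = 1 <;> by_cases hb : b = 1 <;>
      simp [gen_new_state, gen_new_state_alt, genA_loop, genStates, ha, hb,
        PySem.List.enumerate]
  | [a, b, c] =>
    by_cases ha : a = 1 <;> by_cases hb : b = 1 <;> by_cases hc : c = 1 <;>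
      simp [gen_new_state, gen_new_state_alt, genA_loop, genStates, ha, hb, hc,
        PySem.List.enumerate]
  | a :: b :: c :: d :: t =>
    by_cases ha : a = 1 <;> by_cases hb : b = 1 <;> by_cases hc : c = 1 <;> by_cases hd : d = 1 <;>
      by_cases ht : t.any (fun x => x == 1) = true <;>
      simp [gen_new_state, gen_new_state_alt, genA_loop, genStates, ha, hb, hc, hd, ht,
        genA_loop_tail t 4 _ (by omega), PySem.List.enumerate]
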